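-- pv_equiv track=rewrite | github.com/rmorriscpux/daily-coding-challenges | 281-300/challenge_292.py | validateAdjacencyList
-- ===== SOURCE A (Python) =====
-- def validateAdjacencyList(students: dict[int, list[int]]) -> bool:
--     for s, e_list in students.items():
--         if s in e_list:
--             return False
--         for e in e_list:
--             if not(e in students and s in students[e]):
--                 return False
--     return True
-- ===== SOURCE B (Python) =====
-- def validateAdjacencyList(students: dict[int, list[int]]) -> bool:
--     # The list is valid iff the directed-edge relation equals its own transpose
--     # (symmetry + every neighbor is a key) and has an empty diagonal (no self-loops).
--     fwd = {(s, e) for s, lst in students.items() for e in lst}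
--     rev = {(e, s) for s, lst in students.items() for e in lst}
--     return fwd == rev and all(s != e for s, e in fwd)
-- ===== Notes on version B (the rewrite author's own statement) =====
-- stated objective: alternative
-- what changed: B replaces A's nested per-neighbor validation loop (dict lookup plus list scan for every edge) by a global relational check: it builds the directed-edge relation and its transpose and returns whether the two are equal as sets and the relation has an empty diagonal.
import Mathlib
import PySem

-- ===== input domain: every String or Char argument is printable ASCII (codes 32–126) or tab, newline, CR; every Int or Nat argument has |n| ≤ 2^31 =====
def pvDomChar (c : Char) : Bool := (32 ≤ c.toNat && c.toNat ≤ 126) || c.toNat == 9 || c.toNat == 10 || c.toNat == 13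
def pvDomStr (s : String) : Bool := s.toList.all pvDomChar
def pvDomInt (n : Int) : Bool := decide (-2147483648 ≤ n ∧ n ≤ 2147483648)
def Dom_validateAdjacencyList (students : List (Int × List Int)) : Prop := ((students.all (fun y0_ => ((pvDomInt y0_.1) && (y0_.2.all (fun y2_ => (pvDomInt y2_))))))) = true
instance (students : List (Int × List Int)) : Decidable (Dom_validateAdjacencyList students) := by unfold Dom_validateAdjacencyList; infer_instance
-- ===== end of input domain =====

-- B checks the directed-edge relation equals its own transpose (as sets) and has an empty
-- diagonal, replacing A's per-neighbor dict-lookup-and-scan loop (alternative decomposition).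


-- ===== PORT A =====
-- inner loop: 'for e in e_list: if not(e in students and s in students[e]): return False'
def vaInner (full : List (Int × List Int)) (s : Int) : List Int → Bool
  | [] => true
  | e :: rest =>
    match full.find? (fun q => q.1 == e) with   -- 'e in students' + 'students[e]' (first match)
    | none => false
    | some q => if q.2.contains s then vaInner full s rest else false

def vaGo (full : List (Int × List Int)) : List (Int × List Int) → Bool
  | [] => true
  | (s, elist) :: rest =>
    if elist.contains s then false
    else if vaInner full s elist then vaGo full rest else false

def validateAdjacencyList (students : List (Int × List Int)) : Bool :=
  vaGo students students

-- ===== PORT B =====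
-- fwd = {(s, e) for s, lst in students.items() for e in lst}
def vbFwd (students : List (Int × List Int)) : List (Int × Int) :=
  PySem.Set.ofList (students.flatMap (fun p => p.2.map (fun e => (p.1, e))))

-- rev = {(e, s) for s, lst in students.items() for e in lst}
def vbRev (students : List (Int × List Int)) : List (Int × Int) :=
  PySem.Set.ofList (students.flatMap (fun p => p.2.map (fun e => (e, p.1))))

-- return fwd == rev and all(s != e for s, e in fwd)
def validateAdjacencyList_alt (students : List (Int × List Int)) : Bool :=
  PySem.Set.equal (vbFwd students) (vbRev students)
    && (vbFwd students).all (fun x => !(x.1 == x.2))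

-- ===== PRECONDITION & SPEC =====
-- Pre_ requires distinct keys: an association list with duplicate keys cannot arise from a
-- Python dict (dict keys are unique), so no input A accepts in Python is excluded.
def Pre_validateAdjacencyList (students : List (Int × List Int)) : Prop :=
  (students.map Prod.fst).Nodup
instance (students : List (Int × List Int)) : Decidable (Pre_validateAdjacencyList students) := by
  unfold Pre_validateAdjacencyList; infer_instance

def pvWitness_validateAdjacencyList : (List (Int × List Int)) := [(1, [2]), (2, [1])]

def Spec_validateAdjacencyList (students : List (Int × List Int)) (out : Bool) : Prop := out = validateAdjacencyList_alt students
instance (students : List (Int × List Int)) (out : Bool) : Decidable (Spec_validateAdjacencyList students out) := by unfold Spec_validateAdjacencyList; infer_instance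

-- ===== CLAIM (what is proved, stated in full; the proofs are below) =====
def Claim_equal_validateAdjacencyList : Prop := ∀ (students : List (Int × List Int)), Dom_validateAdjacencyList students → Pre_validateAdjacencyList students → Spec_validateAdjacencyList students (validateAdjacencyList students)

-- ===== LEMMAS AND PROOFS =====

-- the multiset of directed edges
def vEdgesRaw (students : List (Int × List Int)) : List (Int × Int) :=
  students.flatMap (fun p => p.2.map (fun e => (p.1, e)))

theorem mem_vEdgesRaw (students : List (Int × List Int)) (a b : Int) :
    (a, b) ∈ vEdgesRaw students ↔ ∃ p ∈ students, p.1 = a ∧ b ∈ p.2 := by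
  simp only [vEdgesRaw, List.mem_flatMap, List.mem_map]
  constructor
  · rintro ⟨p, hp, e, he, heq⟩
    cases heq
    exact ⟨p, hp, rfl, he⟩
  · rintro ⟨p, hp, h1, h2⟩
    exact ⟨p, hp, b, h2, by rw [h1]⟩

-- the raw transpose list has exactly the swapped members
theorem mem_revRaw (students : List (Int × List Int)) (a b : Int) :
    (a, b) ∈ students.flatMap (fun p => p.2.map (fun e => (e, p.1))) ↔
      (b, a) ∈ vEdgesRaw students := by
  simp only [vEdgesRaw, List.mem_flatMap, List.mem_map]
  constructor
  · rintro ⟨p, hp, e, he, heq⟩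
    cases heq
    exact ⟨p, hp, a, he, rfl⟩
  · rintro ⟨p, hp, e, he, heq⟩
    cases heq
    exact ⟨p, hp, a, he, rfl⟩

theorem alt_eq_true (students : List (Int × List Int)) :
    validateAdjacencyList_alt students = true ↔
      ∀ x ∈ vEdgesRaw students, x.1 ≠ x.2 ∧ (x.2, x.1) ∈ vEdgesRaw students := by
  unfold validateAdjacencyList_alt vbFwd vbRev
  rw [Bool.and_eq_true, PySem.Set.equal_iff, List.all_eq_true]
  constructor
  · rintro ⟨heq, hdiag⟩ ⟨a, b⟩ hx
    refine ⟨?_, ?_⟩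
    · have := hdiag (a, b) ((PySem.Set.mem_ofList _ _).mpr hx)
      simpa using this
    · have h1 : (b, a) ∈ PySem.Set.ofList
          (students.flatMap (fun p => p.2.map (fun e => (e, p.1)))) :=
        (PySem.Set.mem_ofList _ _).mpr ((mem_revRaw students b a).mpr hx)
      exact (PySem.Set.mem_ofList _ _).mp ((heq (b, a)).mpr h1)
  · intro h
    constructor
    · rintro ⟨a, b⟩
      rw [PySem.Set.mem_ofList, PySem.Set.mem_ofList, mem_revRaw]
      show (a, b) ∈ vEdgesRaw students ↔ _
      constructor
      · intro hx; exact (h (a, b) hx).2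
      · intro hx; exact (h (b, a) hx).2
    · rintro ⟨a, b⟩ hx
      have := (h (a, b) ((PySem.Set.mem_ofList _ _).mp hx)).1
      simpa using this

theorem find?_key_of_nodup (students : List (Int × List Int))
    (h : (students.map Prod.fst).Nodup) (q : Int × List Int) (hq : q ∈ students) :
    students.find? (fun p => p.1 == q.1) = some q := by
  induction students with
  | nil => cases hq
  | cons hd tl ih =>
    simp only [List.map_cons, List.nodup_cons] at h
    rcases List.mem_cons.mp hq with rfl | hmem
    · rw [List.find?_cons_of_pos (by simp)]
    · have hne : hd.1 ≠ q.1 := by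
        intro he
        exact h.1 (he ▸ List.mem_map_of_mem hmem)
      rw [List.find?_cons_of_neg (by simpa using hne)]
      exact ih h.2 hmem

theorem vaInner_eq_true (students : List (Int × List Int))
    (h : (students.map Prod.fst).Nodup) (s : Int) (l : List Int) :
    vaInner students s l = true ↔ ∀ e ∈ l, (e, s) ∈ vEdgesRaw students := by
  induction l with
  | nil => simp [vaInner]
  | cons e rest ih =>
    simp only [vaInner, List.forall_mem_cons]
    cases hf : students.find? (fun q => q.1 == e) with
    | none =>
      show (false = true) ↔ _
      constructor
      · intro hfalse; exact absurd hfalse (by simp)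
      · rintro ⟨h1, -⟩
        rcases (mem_vEdgesRaw students e s).mp h1 with ⟨p, hp, hk, -⟩
        have := find?_key_of_nodup students h p hp
        rw [hk] at this
        rw [this] at hf; cases hf
    | some q =>
      show (if q.2.contains s = true then vaInner students s rest else false) = true ↔ _
      have hq1 : q ∈ students := List.mem_of_find?_eq_some hf
      have hq2 : q.1 = e := by simpa using List.find?_some hf
      by_cases hs : q.2.contains s
      · simp only [hs, if_true, ih]
        constructor
        · intro hall
          exact ⟨(mem_vEdgesRaw students e s).mpr ⟨q, hq1, hq2, by simpa using hs⟩, hall⟩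
        · exact fun hall => hall.2
      · simp only [hs]
        constructor
        · intro hfalse; exact absurd hfalse (by simp)
        · rintro ⟨h1, -⟩
          rcases (mem_vEdgesRaw students e s).mp h1 with ⟨p, hp, hk, hmem⟩
          have := find?_key_of_nodup students h p hp
          rw [hk] at this
          rw [this] at hf
          cases hf
          exact absurd (by simpa using hmem) (by simpa using hs)

theorem vaGo_cons (full tl : List (Int × List Int)) (s : Int) (elist : List Int) :
    vaGo full ((s, elist) :: tl) =
      (!(elist.contains s) && vaInner full s elist && vaGo full tl) := by
  by_cases h : elist.contains s <;> by_cases hi : vaInner full s elist <;>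
    simp [vaGo, hi]

theorem vaGo_eq_true (full : List (Int × List Int))
    (h : (full.map Prod.fst).Nodup) (l : List (Int × List Int)) :
    vaGo full l = true ↔
      ∀ p ∈ l, p.1 ∉ p.2 ∧ ∀ e ∈ p.2, (e, p.1) ∈ vEdgesRaw full := by
  induction l with
  | nil => simp [vaGo]
  | cons hd tl ih =>
    obtain ⟨s, elist⟩ := hd
    rw [vaGo_cons]
    simp only [Bool.and_eq_true, Bool.not_eq_true', ih, List.forall_mem_cons,
      vaInner_eq_true full h s elist]
    constructor
    · rintro ⟨⟨h1, h2⟩, h3⟩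
      exact ⟨⟨by simpa using h1, h2⟩, h3⟩
    · rintro ⟨⟨h1, h2⟩, h3⟩
      exact ⟨⟨by simpa using h1, h2⟩, h3⟩

theorem main_equiv (students : List (Int × List Int))
    (h : (students.map Prod.fst).Nodup) :
    validateAdjacencyList students = validateAdjacencyList_alt students := by
  have ha := vaGo_eq_true students h students
  have hb := alt_eq_true students
  unfold validateAdjacencyList
  cases hA : vaGo students students with
  | true =>
    symm
    rw [hb]
    rintro ⟨a, b⟩ hx
    rcases (mem_vEdgesRaw students a b).mp hx with ⟨p, hp, h1, h2⟩
    have hpp := (ha.mp hA) p hp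
    dsimp only
    constructor
    · intro he
      exact hpp.1 (by rw [h1, he]; exact h2)
    · have := hpp.2 b h2
      rwa [h1] at this
  | false =>
    symm
    rw [← Bool.not_eq_true] at hA ⊢
    intro hB
    apply hA
    rw [ha]
    intro p hp
    have hBall := hb.mp hB
    constructor
    · intro hmem
      have hx : (p.1, p.1) ∈ vEdgesRaw students :=
        (mem_vEdgesRaw students p.1 p.1).mpr ⟨p, hp, rfl, hmem⟩
      exact (hBall _ hx).1 rfl
    · intro e he
      have hx : (p.1, e) ∈ vEdgesRaw students :=
        (mem_vEdgesRaw students p.1 e).mpr ⟨p, hp, rfl, he⟩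
      exact (hBall _ hx).2

-- ===== VERDICT (by name: the statement is the Claim_ definition above) =====
theorem validateAdjacencyList_spec : Claim_equal_validateAdjacencyList := by
  intro students _ hpre
  unfold Spec_validateAdjacencyList
  exact main_equiv students hpre
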